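-- pv_equiv track=rewrite | github.com/yeeking/myk-tracker | devices/lcdsysinfo/test_display_string.py | _layout_positions
-- ===== SOURCE A (Python) =====
-- COLS = 3
--
-- ROWS = 2
--
-- def _layout_positions(text):
--     positions = []
--     row = 0
--     col = 0
--     for ch in text:
--         if ch == "\n" or ch == "-":
--             row += 1
--             col = 0
--             if row >= ROWS:
--                 break
--             continue
--         positions.append((ch, row, col))
--         col += 1
--         if col >= COLS:
--             row += 1
--             col = 0
--             if row >= ROWS:
--                 break
--     return positions
-- ===== SOURCE B (Python) =====
-- COLS = 3
--
-- ROWS = 2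
--
-- def _layout_positions(text):
--     positions = []
--     i = 0
--     n = len(text)
--     for row in range(ROWS):
--         col = 0
--         while col < COLS:
--             if i >= n:
--                 return positions
--             ch = text[i]
--             i += 1
--             if ch == "\n" or ch == "-":
--                 break
--             positions.append((ch, row, col))
--             col += 1
--     return positions
-- ===== Notes on version B (the rewrite author's own statement) =====
-- stated objective: alternative
-- what changed: Replaces A's flat single-pass state machine (row/col counters updated and checked inside one loop over the characters) with a grid-shaped nested traversal: an outer for-row loop over range(ROWS) and an inner while-col loop that consumes characters via an explicit index and returns early when the text is exhausted.
import Mathlib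
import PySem

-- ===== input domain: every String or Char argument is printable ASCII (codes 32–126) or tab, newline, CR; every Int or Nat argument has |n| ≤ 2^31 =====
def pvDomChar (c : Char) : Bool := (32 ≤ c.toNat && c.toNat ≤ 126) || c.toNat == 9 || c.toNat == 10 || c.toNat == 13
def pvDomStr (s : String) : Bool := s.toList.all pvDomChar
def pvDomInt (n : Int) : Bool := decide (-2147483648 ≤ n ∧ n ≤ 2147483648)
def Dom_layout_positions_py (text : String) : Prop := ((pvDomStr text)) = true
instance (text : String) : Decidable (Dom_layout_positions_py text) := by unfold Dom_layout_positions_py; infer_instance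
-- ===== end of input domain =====

-- B replaces A's flat row/col state machine with nested row/column loops over an
-- explicit text index (a different decomposition of the same O(n) layout pass).

-- ===== PORT A =====
-- A's single loop over the characters, carrying (row, col, positions) and using
-- early termination (the two `break`s) as returning the accumulator.
def layoutLoopA : List Char → Int → Int → List (String × Int × Int) → List (String × Int × Int)
  | [], _, _, acc => acc
  | ch :: rest, row, col, acc =>
    if ch = '\n' ∨ ch = '-' then
      if row + 1 ≥ 2 then acc else layoutLoopA rest (row + 1) 0 acc
    else
      let acc' := acc ++ [(String.ofList [ch], row, col)]
      if col + 1 ≥ 3 then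
        if row + 1 ≥ 2 then acc' else layoutLoopA rest (row + 1) 0 acc'
      else
        layoutLoopA rest row (col + 1) acc'

def layout_positions_py (text : String) : List (String × Int × Int) :=
  layoutLoopA text.toList 0 0 []

-- ===== PORT B =====
-- B's inner `while col < COLS` loop: consumes characters, `.inl acc` models the
-- early `return positions` (text exhausted), `.inr (rest, acc)` models the loop
-- ending (break on a separator, or col reaching COLS).
def innerLoopB (row : Int) : List Char → Int → List (String × Int × Int) →
    (List (String × Int × Int)) ⊕ (List Char × List (String × Int × Int))
  | cs, col, acc =>
    if col ≥ 3 then .inr (cs, acc)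
    else
      match cs with
      | [] => .inl acc
      | ch :: rest =>
        if ch = '\n' ∨ ch = '-' then .inr (rest, acc)
        else innerLoopB row rest (col + 1) (acc ++ [(String.ofList [ch], row, col)])

-- B's outer `for row in range(ROWS)` loop.
def outerLoopB : List Int → List Char → List (String × Int × Int) → List (String × Int × Int)
  | [], _, acc => acc
  | row :: rows, cs, acc =>
    match innerLoopB row cs 0 acc with
    | .inl acc' => acc'
    | .inr (cs', acc') => outerLoopB rows cs' acc'

def layout_positions_py_alt (text : String) : List (String × Int × Int) :=
  outerLoopB (PySem.List.pyRange 0 2 1) text.toList []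

-- ===== PRECONDITION & SPEC =====
def Spec_layout_positions_py (text : String) (out : List (String × Int × Int)) : Prop := out = layout_positions_py_alt text
instance (text : String) (out : List (String × Int × Int)) : Decidable (Spec_layout_positions_py text out) := by unfold Spec_layout_positions_py; infer_instance

-- ===== CLAIM (what is proved, stated in full; the proofs are below) =====
def Claim_equal_layout_positions_py : Prop := ∀ (text : String), Dom_layout_positions_py text → Spec_layout_positions_py text (layout_positions_py text)

-- ===== LEMMAS AND PROOFS =====

-- B's inner loop stops immediately once col has reached COLS.
theorem innerLoopB_full (row : Int) (cs : List Char) (col : Int) (acc : List (String × Int × Int))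
    (h : col ≥ 3) : innerLoopB row cs col acc = .inr (cs, acc) := by
  cases cs <;> simp [innerLoopB, h]

-- On the last row (row = 1) every exit of B's inner loop yields the accumulator,
-- exactly as A's loop returns on any row advance.
theorem lastRow (cs : List Char) : ∀ (col : Int) (acc : List (String × Int × Int)),
    0 ≤ col → col < 3 →
    layoutLoopA cs 1 col acc =
      (match innerLoopB 1 cs col acc with
       | .inl a => a
       | .inr (_, a) => a) := by
  induction cs with
  | nil =>
    intro col acc h0 h3
    simp [layoutLoopA, innerLoopB, not_le.mpr h3]
  | cons ch rest ih =>
    intro col acc h0 h3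
    by_cases hs : ch = '\n' ∨ ch = '-'
    · simp [layoutLoopA, innerLoopB, not_le.mpr h3, hs]
    · by_cases hc : col + 1 ≥ 3
      · simp [layoutLoopA, innerLoopB, not_le.mpr h3, hs, hc, innerLoopB_full _ _ _ _ hc]
      · have := ih (col + 1) (acc ++ [(String.ofList [ch], 1, col)]) (by omega) (by omega)
        simp [layoutLoopA, innerLoopB, not_le.mpr h3, hs, hc, this]

-- On the first row (row = 0) A's loop agrees with one pass of B's inner loop
-- followed by A continuing at (row = 1, col = 0) when the row ended normally.
theorem firstRow (cs : List Char) : ∀ (col : Int) (acc : List (String × Int × Int)),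
    0 ≤ col → col < 3 →
    layoutLoopA cs 0 col acc =
      (match innerLoopB 0 cs col acc with
       | .inl a => a
       | .inr (cs', a) => layoutLoopA cs' 1 0 a) := by
  induction cs with
  | nil =>
    intro col acc h0 h3
    simp [layoutLoopA, innerLoopB, not_le.mpr h3]
  | cons ch rest ih =>
    intro col acc h0 h3
    by_cases hs : ch = '\n' ∨ ch = '-'
    · simp [layoutLoopA, innerLoopB, not_le.mpr h3, hs]
    · by_cases hc : col + 1 ≥ 3
      · simp [layoutLoopA, innerLoopB, not_le.mpr h3, hs, hc, innerLoopB_full _ _ _ _ hc]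
      · have := ih (col + 1) (acc ++ [(String.ofList [ch], 0, col)]) (by omega) (by omega)
        simp [layoutLoopA, innerLoopB, not_le.mpr h3, hs, hc, this]

-- ===== VERDICT (by name: the statement is the Claim_ definition above) =====
theorem layout_positions_py_spec : Claim_equal_layout_positions_py := by
  intro text _
  unfold Spec_layout_positions_py layout_positions_py layout_positions_py_alt
  have hr : PySem.List.pyRange 0 2 1 = [0, 1] := by decide
  rw [hr]
  rw [firstRow text.toList 0 [] (by omega) (by omega)]
  cases h : innerLoopB 0 text.toList 0 [] with
  | inl a => simp [outerLoopB, h]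
  | inr p =>
    obtain ⟨cs', a⟩ := p
    rw [show (match Sum.inr (α := List (String × Int × Int)) (cs', a) with
         | Sum.inl a => a
         | Sum.inr (cs', a) => layoutLoopA cs' 1 0 a) = layoutLoopA cs' 1 0 a from rfl]
    rw [lastRow cs' 0 a (by omega) (by omega)]
    cases h2 : innerLoopB 1 cs' 0 a <;> simp [outerLoopB, h, h2]
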